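-- pv_equiv track=rewrite | github.com/Owhen-Min/Montly_Quest | 1st/서울_3반_민경현/problem02.py | population_difference
-- ===== SOURCE A (Python) =====
-- def population_difference(population_list):
--     # 여기에 코드를 작성하여 함수를 완성합니다.
--     max_pop = population_list[0]
--     min_pop = population_list[0]
--     # 비교를 위한 기준점을 잡기 위해 변수 선언. 해당 문제의 경우 0 미만의 인구수는 존재하지 않으므로 두 변수 모두 0으로 선언할 수 있지만, 다른 문제에서 실수하지 않게 해당 리스트의 첫 값으로 선언함.
--     for pop in population_list:
--         if pop > max_pop:
--             max_pop = pop
--         elif pop < min_pop: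
--             min_pop = pop
--     # pop이 현재까지의 max_pop보다 큰 경우 max_pop의 값을 갱신하고, pop이 현재까지의 min_pop과 작은 경우 min_pop의 값을 갱신한다. pop이 max_pop보다 크면서 min_pop보다 작을 경우는 없기 때문에 elif로 작성.
--
--     return max_pop - min_pop
-- ===== SOURCE B (Python) =====
-- def population_difference(population_list):
--     # sort-then-index: range = largest minus smallest of the sorted copy
--     s = sorted(population_list)
--     return s[-1] - s[0]
-- ===== Notes on version B (the rewrite author's own statement) =====
-- stated objective: alternative
-- what changed: Replaces the single-pass explicit max/min tracking loop with sorting a copy and subtracting the first sorted element from the last.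
import Mathlib
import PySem

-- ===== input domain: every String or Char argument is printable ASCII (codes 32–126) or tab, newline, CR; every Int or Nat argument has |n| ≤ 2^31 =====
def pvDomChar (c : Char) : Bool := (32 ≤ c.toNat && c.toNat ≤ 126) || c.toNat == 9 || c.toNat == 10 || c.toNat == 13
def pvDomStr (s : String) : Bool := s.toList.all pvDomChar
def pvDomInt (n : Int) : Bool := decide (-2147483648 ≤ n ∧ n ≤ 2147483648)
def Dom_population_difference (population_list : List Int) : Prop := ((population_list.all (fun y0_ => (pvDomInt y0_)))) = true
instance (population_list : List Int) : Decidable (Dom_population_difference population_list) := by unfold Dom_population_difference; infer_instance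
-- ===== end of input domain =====

-- B replaces A's single-pass max/min tracking loop by sorting a copy and subtracting first from last (alternative decomposition, not faster).

-- ===== PORT A =====
def population_difference (population_list : List Int) : Int :=
  let max_pop := PySem.List.pyGetD population_list 0 0
  let min_pop := PySem.List.pyGetD population_list 0 0
  let st := population_list.foldl
    (fun st pop => if pop > st.1 then (pop, st.2) else if pop < st.2 then (st.1, pop) else st)
    (max_pop, min_pop)
  st.1 - st.2

-- ===== PORT B =====
def population_difference_alt (population_list : List Int) : Int :=
  let s := PySem.List.sorted population_list (fun x => x) false
  PySem.List.pyGetD s (-1) 0 - PySem.List.pyGetD s 0 0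

-- ===== PRECONDITION & SPEC =====
-- Pre_ excludes only the empty list, on which Python A raises IndexError when reading the first element.
def Pre_population_difference (population_list : List Int) : Prop := population_list ≠ []
instance (population_list : List Int) : Decidable (Pre_population_difference population_list) := by unfold Pre_population_difference; infer_instance
def pvWitness_population_difference : List Int := [3, 1, 4]

def Spec_population_difference (population_list : List Int) (out : Int) : Prop := out = population_difference_alt population_list
instance (population_list : List Int) (out : Int) : Decidable (Spec_population_difference population_list out) := by unfold Spec_population_difference; infer_instance

-- ===== CLAIM (what is proved, stated in full; the proofs are below) =====
def Claim_equal_population_difference : Prop := ∀ (population_list : List Int), Dom_population_difference population_list → Pre_population_difference population_list → Spec_population_difference population_list (population_difference population_list)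

-- ===== LEMMAS AND PROOFS =====

-- A's loop is the pair of extremal folds, provided the running min is below the running max.
lemma foldA_eq (xs : List Int) : ∀ a b : Int, b ≤ a →
    xs.foldl (fun st pop => if pop > st.1 then (pop, st.2) else if pop < st.2 then (st.1, pop) else st) (a, b)
      = (xs.foldl max a, xs.foldl min b) := by
  induction xs with
  | nil => intro a b _; rfl
  | cons x xs ih =>
    intro a b hba
    simp only [List.foldl_cons]
    by_cases h1 : x > a
    · have : max a x = x := by omega
      have : min b x = b := by omega
      simp only [if_pos h1]
      rw [ih x b (by omega)]
      congr 1 <;> [skip; skip] <;> congr 1 <;> omega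
    · simp only [if_neg h1]
      by_cases h2 : x < b
      · simp only [if_pos h2]
        rw [ih a x (by omega)]
        congr 1 <;> congr 1 <;> omega
      · simp only [if_neg h2]
        rw [ih a b hba]
        congr 1 <;> congr 1 <;> omega

lemma le_getLast_of_pairwise (s : List Int) (h : s ≠ []) (hp : s.Pairwise (· ≤ ·)) :
    ∀ y ∈ s, y ≤ s.getLast h := by
  induction s with
  | nil => exact absurd rfl h
  | cons a t ih =>
    intro y hy
    cases t with
    | nil => simp at hy; simp [List.getLast, hy]
    | cons b u =>
      rw [List.getLast_cons (by simp)]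
      rcases List.mem_cons.mp hy with rfl | hy
      · have hle : ∀ z ∈ b :: u, y ≤ z := (List.pairwise_cons.mp hp).1
        exact le_trans (hle _ (List.getLast_mem _)) (le_refl _)
      · exact ih (by simp) (List.pairwise_cons.mp hp).2 y hy

-- ===== VERDICT (by name: the statement is the Claim_ definition above) =====
theorem population_difference_spec : Claim_equal_population_difference := by
  intro l _ hne
  unfold Spec_population_difference population_difference population_difference_alt
  obtain ⟨h, t, rfl⟩ := List.exists_cons_of_ne_nil hne
  simp only [PySem.List.pyGetD_zero_cons, List.foldl_cons, gt_iff_lt, lt_irrefl, if_false]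
  rw [foldA_eq t h h (le_refl h)]
  -- name the sorted list and its shape
  set s := PySem.List.sorted (h :: t) (fun x => x) false with hs
  have hsne : s ≠ [] := by
    rw [hs]; intro hnil
    exact absurd ((PySem.List.sorted_eq_nil_iff (h :: t) (fun x => x) false).mp hnil) (by simp)
  obtain ⟨m, r, hsr⟩ := List.exists_cons_of_ne_nil hsne
  have hperm : s.Perm (h :: t) := PySem.List.sorted_perm ..
  have hpw : s.Pairwise (fun a b => (fun x => x) a ≤ (fun x => x) b) := PySem.List.sorted_pairwise ..
  -- head of sorted = the min fold
  have hmin : m = t.foldl min h := by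
    have hm_le : ∀ y ∈ h :: t, m ≤ y := by
      intro y hy
      exact PySem.List.key_head_sorted_le (key := fun x => x) (xs := h :: t) (by rw [← hs, hsr]) y hy
    have hm_mem : m ∈ h :: t := hperm.mem_iff.mp (by rw [hsr]; simp)
    have h1 : t.foldl min h ≤ m := by
      rcases List.mem_cons.mp hm_mem with rfl | hm'
      · exact (PySem.List.foldl_min_le t m).1
      · exact (PySem.List.foldl_min_le t h).2 m hm'
    have h2 : m ≤ t.foldl min h := by
      rcases PySem.List.foldl_min_mem t h with he | he
      · rw [he]; exact hm_le _ (by simp)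
      · exact hm_le _ (List.mem_cons_of_mem _ he)
    omega
  -- last of sorted = the max fold
  have hmax : s.getLast hsne = t.foldl max h := by
    have hl_mem : s.getLast hsne ∈ h :: t := hperm.mem_iff.mp (List.getLast_mem hsne)
    have h1 : s.getLast hsne ≤ t.foldl max h := by
      rcases List.mem_cons.mp hl_mem with he | hm'
      · rw [he]; exact (PySem.List.le_foldl_max t h).1
      · exact (PySem.List.le_foldl_max t h).2 _ hm'
    have h2 : t.foldl max h ≤ s.getLast hsne := by
      apply le_getLast_of_pairwise s hsne hpw
      apply hperm.mem_iff.mpr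
      rcases PySem.List.foldl_max_mem t h with he | he
      · rw [he]; simp
      · exact List.mem_cons_of_mem _ he
    omega
  rw [PySem.List.pyGetD_neg_one (h := hsne), hmax, hsr, PySem.List.pyGetD_zero_cons, hmin]
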